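-- pv_equiv track=rewrite | github.com/Ben-Schneider-code/vision_backdooring | src/backdoor/poison/poison_label/functional_map_poison.py | getTargetClasses
-- ===== SOURCE A (Python) =====
-- def getTargetClasses(map):
--     count_0 = -1
--     count_1 = -1
--     class_0 = -1
--     class_1 = -1
--
--     for key in map.keys():
--         binary_code = map[key]
--
--         if binary_code.count('0') > count_0:
--             count_0 = binary_code.count('0')
--             class_0 = key
--
--         if binary_code.count('1') > count_1:
--             count_1 = binary_code.count('1')
--             class_1 = key
--
--     return class_0, class_1
-- ===== SOURCE B (Python) =====
-- def getTargetClasses(map):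
--     items = list(map.items())
--     if not items:
--         return -1, -1
--     by0 = sorted(items, key=lambda kv: kv[1].count('0'), reverse=True)
--     by1 = sorted(items, key=lambda kv: kv[1].count('1'), reverse=True)
--     return by0[0][0], by1[0][0]
-- ===== Notes on version B (the rewrite author's own statement) =====
-- stated objective: alternative
-- what changed: Replaced the fused four-accumulator selection loop by two stable descending sorts of the items (by '0'-count and by '1'-count) whose heads are taken; stability makes each head the first key with maximal count, matching A's strict '>' first-wins updates.
import Mathlib
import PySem

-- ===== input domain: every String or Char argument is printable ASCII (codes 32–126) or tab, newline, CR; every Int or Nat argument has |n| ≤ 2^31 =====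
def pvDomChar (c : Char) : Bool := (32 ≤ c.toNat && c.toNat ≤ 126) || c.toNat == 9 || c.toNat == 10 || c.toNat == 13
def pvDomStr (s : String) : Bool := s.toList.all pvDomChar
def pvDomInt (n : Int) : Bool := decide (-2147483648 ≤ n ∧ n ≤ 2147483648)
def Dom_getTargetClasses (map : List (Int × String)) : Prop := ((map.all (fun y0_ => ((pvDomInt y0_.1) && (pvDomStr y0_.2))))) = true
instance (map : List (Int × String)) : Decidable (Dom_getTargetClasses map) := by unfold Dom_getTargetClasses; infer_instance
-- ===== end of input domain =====

-- B: two stable descending sorts of the items (by '0'-count and '1'-count) whose heads are taken,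
-- instead of A's fused four-accumulator selection loop; same return value, different algorithm.

-- ===== PORT A =====
def pvAUpd (k : Int × String → Nat) (s : Int × Int) (kv : Int × String) : Int × Int :=
  if (k kv : Int) > s.1 then ((k kv : Int), kv.1) else s

def pvAStep (st : (Int × Int) × (Int × Int)) (kv : Int × String) : (Int × Int) × (Int × Int) :=
  (pvAUpd (fun kv => PySem.Str.count kv.2 "0") st.1 kv,
   pvAUpd (fun kv => PySem.Str.count kv.2 "1") st.2 kv)

def getTargetClasses (map : List (Int × String)) : Int × Int :=
  let st := map.foldl pvAStep ((-1, -1), (-1, -1))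
  (st.1.2, st.2.2)

-- ===== PORT B =====
def getTargetClasses_alt (map : List (Int × String)) : Int × Int :=
  match PySem.List.sorted map (fun kv => PySem.Str.count kv.2 "0") true,
        PySem.List.sorted map (fun kv => PySem.Str.count kv.2 "1") true with
  | p0 :: _, p1 :: _ => (p0.1, p1.1)
  | _, _ => (-1, -1)

-- ===== PRECONDITION & SPEC =====
def Spec_getTargetClasses (map : List (Int × String)) (out : Int × Int) : Prop := out = getTargetClasses_alt map
instance (map : List (Int × String)) (out : Int × Int) : Decidable (Spec_getTargetClasses map out) := by unfold Spec_getTargetClasses; infer_instance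

-- ===== CLAIM (what is proved, stated in full; the proofs are below) =====
def Claim_equal_getTargetClasses : Prop := ∀ (map : List (Int × String)), Dom_getTargetClasses map → Spec_getTargetClasses map (getTargetClasses map)

-- ===== LEMMAS AND PROOFS =====

-- running first-argmax step: keep m unless x's key is strictly larger
def pvBStep (k : Int × String → Nat) (m x : Int × String) : Int × String :=
  if k m < k x then x else m

-- the head of the stable descending insertion sort is the running first-argmax
theorem pv_foldl_insert_head (k : Int × String → Nat) :
    ∀ (t : List (Int × String)) (h : Int × String) (r : List (Int × String)),
    ∃ r', t.foldl (fun acc x => PySem.List.insertBy (fun a b => decide (k b < k a)) x acc) (h :: r)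
        = (t.foldl (pvBStep k) h) :: r' := by
  intro t
  induction t with
  | nil => intro h r; exact ⟨r, rfl⟩
  | cons x t ih =>
    intro h r
    simp only [List.foldl_cons, PySem.List.insertBy, pvBStep]
    by_cases hx : k h < k x
    · simp only [hx, decide_true, if_pos]
      exact ih x (h :: r)
    · simp only [hx, decide_false, if_neg, Bool.false_eq_true, not_false_iff]
      exact ih h _

theorem pv_sorted_head (k : Int × String → Nat) (b : Int × String) (t : List (Int × String)) :
    ∃ r', PySem.List.sorted (b :: t) k true = (t.foldl (pvBStep k) b) :: r' := by
  rw [PySem.List.sorted_rev_eq_foldl_insertBy]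
  simp only [List.foldl_cons]
  exact pv_foldl_insert_head k t b []

theorem pv_afold (k : Int × String → Nat) (t : List (Int × String)) (b : Int × String) :
    t.foldl (pvAUpd k) ((k b : Int), b.1)
      = ((k (t.foldl (pvBStep k) b) : Int), (t.foldl (pvBStep k) b).1) := by
  induction t generalizing b with
  | nil => rfl
  | cons x t ih =>
    simp only [List.foldl_cons, pvAUpd, pvBStep]
    by_cases h : k b < k x
    · have : ((k x : Nat) : Int) > ((k b : Nat) : Int) := by exact_mod_cast h
      simp only [this, if_pos, h]
      exact ih x
    · have : ¬ ((k x : Nat) : Int) > ((k b : Nat) : Int) := by exact_mod_cast h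
      simp only [this, if_neg, h, not_false_iff]
      exact ih b

theorem pv_foldl_pair (t : List (Int × String)) (s : (Int × Int) × (Int × Int)) :
    t.foldl pvAStep s
      = (t.foldl (pvAUpd (fun kv => PySem.Str.count kv.2 "0")) s.1,
         t.foldl (pvAUpd (fun kv => PySem.Str.count kv.2 "1")) s.2) := by
  induction t generalizing s with
  | nil => rfl
  | cons x t ih => simp only [List.foldl_cons, pvAStep]; exact ih _

-- ===== VERDICT (by name: the statement is the Claim_ definition above) =====
theorem getTargetClasses_spec : Claim_equal_getTargetClasses := by
  intro map _
  unfold Spec_getTargetClasses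
  cases map with
  | nil => rfl
  | cons b t =>
    have hfirst : ∀ (k : Int × String → Nat),
        pvAUpd k (-1, -1) b = ((k b : Int), b.1) := by
      intro k
      unfold pvAUpd
      have : (k b : Int) > -1 := by omega
      simp [this]
    obtain ⟨r0, h0⟩ := pv_sorted_head (fun kv => PySem.Str.count kv.2 "0") b t
    obtain ⟨r1, h1⟩ := pv_sorted_head (fun kv => PySem.Str.count kv.2 "1") b t
    show (let st := (b :: t).foldl pvAStep ((-1, -1), (-1, -1)); (st.1.2, st.2.2)) = _
    simp only [List.foldl_cons]
    have hs : pvAStep ((-1, -1), (-1, -1)) b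
        = (((PySem.Str.count b.2 "0" : Int), b.1), ((PySem.Str.count b.2 "1" : Int), b.1)) := by
      show (pvAUpd _ (-1,-1) b, pvAUpd _ (-1,-1) b) = _
      rw [hfirst, hfirst]
    rw [hs, pv_foldl_pair]
    simp only [pv_afold]
    unfold getTargetClasses_alt
    rw [h0, h1]
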